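-- pv_equiv track=rewrite | github.com/indrajeetadityaroy9/prompt-calibrated-hallucination-detection | ag_sar/multi_gpu.py | distribute_samples
-- ===== SOURCE A (Python) =====
-- from typing import List, Optional, Dict, Any, Union
--
-- def distribute_samples(
--     samples: List[Any],
--     num_gpus: int,
--     strategy: str = 'round_robin'
-- ) -> List[List[tuple]]:
--     """
--     Distribute samples across GPUs.
--
--     Args:
--         samples: List of samples to distribute
--         num_gpus: Number of GPUs
--         strategy: 'round_robin' or 'chunk'
--
--     Returns:
--         List of (gpu_idx, sample_idx, sample) assignments per GPU
--     """
--     assignments = [[] for _ in range(num_gpus)]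
--
--     if strategy == 'round_robin':
--         for i, sample in enumerate(samples):
--             gpu_idx = i % num_gpus
--             assignments[gpu_idx].append((i, sample))
--     elif strategy == 'chunk':
--         chunk_size = (len(samples) + num_gpus - 1) // num_gpus
--         for gpu_idx in range(num_gpus):
--             start = gpu_idx * chunk_size
--             end = min(start + chunk_size, len(samples))
--             for i in range(start, end):
--                 assignments[gpu_idx].append((i, samples[i]))
--
--     return assignments
-- ===== SOURCE B (Python) =====
-- def distribute_samples(samples, num_gpus, strategy='round_robin'):
--     if strategy == 'round_robin':
--         return [[(i, s) for i, s in enumerate(samples) if i % num_gpus == g]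
--                 for g in range(num_gpus)]
--     if strategy == 'chunk':
--         chunk_size = (len(samples) + num_gpus - 1) // num_gpus
--         return [[(i, samples[i])
--                  for i in range(g * chunk_size, min((g + 1) * chunk_size, len(samples)))]
--                 for g in range(num_gpus)]
--     return [[] for _ in range(num_gpus)]
-- ===== Notes on version B (the rewrite author's own statement) =====
-- stated objective: simpler
-- what changed: A allocates mutable per-GPU buckets and dispatch-appends into them (round_robin via a single enumerate pass, chunk via nested index loops); B builds each GPU's list directly as a per-GPU gather comprehension (round_robin filters enumerate by i % num_gpus == g, chunk slices the index range), with no mutation.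
-- outside the precondition, e.g. on distribute_samples([1, 2], 0, 'round_robin'): A raises ZeroDivisionError, B returns []; on distribute_samples([1], 0, 'chunk'): A raises ZeroDivisionError, B raises ZeroDivisionError
import Mathlib
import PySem

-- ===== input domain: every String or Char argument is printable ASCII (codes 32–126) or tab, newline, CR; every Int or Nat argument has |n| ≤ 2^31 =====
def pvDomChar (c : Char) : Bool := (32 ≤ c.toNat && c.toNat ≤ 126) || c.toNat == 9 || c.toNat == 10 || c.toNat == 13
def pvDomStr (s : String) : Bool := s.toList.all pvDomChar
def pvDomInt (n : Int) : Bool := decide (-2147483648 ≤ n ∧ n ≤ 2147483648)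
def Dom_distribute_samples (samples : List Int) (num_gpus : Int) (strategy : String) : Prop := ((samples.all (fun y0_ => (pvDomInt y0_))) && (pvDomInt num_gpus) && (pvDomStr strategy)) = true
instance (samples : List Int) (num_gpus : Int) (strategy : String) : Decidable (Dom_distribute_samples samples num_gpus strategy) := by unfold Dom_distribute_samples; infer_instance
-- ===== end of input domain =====

-- B replaces A's mutable dispatch-append buckets by direct per-GPU gather comprehensions
-- (round_robin: filter enumerate by residue; chunk: map over the index range); same results, no mutation.

-- ===== PORT A =====
-- assignments[k].append(x): set index k to its old value with x appended (a no-op when k is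
-- out of range, which Pre_ excludes, matching Python's IndexError there).
def pvAppendAt (ls : List (List (Int × Int))) (k : Nat) (x : Int × Int) : List (List (Int × Int)) :=
  ls.set k (ls.getD k [] ++ [x])

def distribute_samples (samples : List Int) (num_gpus : Int) (strategy : String) : List (List (Int × Int)) :=
  -- assignments = [[] for _ in range(num_gpus)]
  let assignments : List (List (Int × Int)) := List.replicate num_gpus.toNat []
  if strategy = "round_robin" then
    -- for i, sample in enumerate(samples): assignments[i % num_gpus].append((i, sample))
    -- (.toNat on the index is exact under Pre_: there num_gpus > 0, so i % num_gpus ≥ 0)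
    (PySem.List.enumerate samples).foldl
      (fun acc p => pvAppendAt acc (PySem.Int.mod p.1 num_gpus).toNat p) assignments
  else if strategy = "chunk" then
    let n : Int := samples.length
    let chunk_size := PySem.Int.floordiv (n + num_gpus - 1) num_gpus
    (PySem.List.pyRange 0 num_gpus 1).foldl
      (fun acc g =>
        let start := g * chunk_size
        let stop := min (start + chunk_size) n
        -- samples[i] via pyGetD: exact, since start ≤ i < stop ≤ n keeps i in range
        (PySem.List.pyRange start stop 1).foldl
          (fun acc2 i => pvAppendAt acc2 g.toNat (i, PySem.List.pyGetD samples i 0)) acc)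
      assignments
  else assignments

-- ===== PORT B =====
def distribute_samples_alt (samples : List Int) (num_gpus : Int) (strategy : String) : List (List (Int × Int)) :=
  if strategy = "round_robin" then
    -- [[(i, s) for i, s in enumerate(samples) if i % num_gpus == g] for g in range(num_gpus)]
    (PySem.List.pyRange 0 num_gpus 1).map
      (fun g => (PySem.List.enumerate samples).filter (fun p => PySem.Int.mod p.1 num_gpus == g))
  else if strategy = "chunk" then
    let n : Int := samples.length
    let chunk_size := PySem.Int.floordiv (n + num_gpus - 1) num_gpus
    -- [[(i, samples[i]) for i in range(g*chunk_size, min((g+1)*chunk_size, n))] for g in range(num_gpus)]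
    (PySem.List.pyRange 0 num_gpus 1).map
      (fun g => (PySem.List.pyRange (g * chunk_size) (min ((g + 1) * chunk_size) n) 1).map
        (fun i => (i, PySem.List.pyGetD samples i 0)))
  else (PySem.List.pyRange 0 num_gpus 1).map (fun _ => [])

-- ===== PRECONDITION & SPEC =====
-- Pre_ excludes exactly the inputs where the Python A raises: 'round_robin' with nonempty samples
-- and num_gpus ≤ 0 (ZeroDivisionError / IndexError), and 'chunk' with num_gpus = 0 (ZeroDivisionError).
def Pre_distribute_samples (samples : List Int) (num_gpus : Int) (strategy : String) : Prop :=
  ¬ (strategy = "round_robin" ∧ samples ≠ [] ∧ num_gpus ≤ 0) ∧ ¬ (strategy = "chunk" ∧ num_gpus = 0)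
instance (samples : List Int) (num_gpus : Int) (strategy : String) : Decidable (Pre_distribute_samples samples num_gpus strategy) := by unfold Pre_distribute_samples; infer_instance

def pvWitness_distribute_samples : List Int × Int × String := ([10, 20, 30], 2, "round_robin")

def Spec_distribute_samples (samples : List Int) (num_gpus : Int) (strategy : String) (out : List (List (Int × Int))) : Prop := out = distribute_samples_alt samples num_gpus strategy
instance (samples : List Int) (num_gpus : Int) (strategy : String) (out : List (List (Int × Int))) : Decidable (Spec_distribute_samples samples num_gpus strategy out) := by unfold Spec_distribute_samples; infer_instance

-- ===== CLAIM (what is proved, stated in full; the proofs are below) =====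
def Claim_equal_distribute_samples : Prop := ∀ (samples : List Int) (num_gpus : Int) (strategy : String), Dom_distribute_samples samples num_gpus strategy → Pre_distribute_samples samples num_gpus strategy → Spec_distribute_samples samples num_gpus strategy (distribute_samples samples num_gpus strategy)


-- ===== LEMMAS AND PROOFS =====

lemma getD_set_self (l : List (List (Int × Int))) (i : Nat) (a : List (Int × Int)) (h : i < l.length) :
    (l.set i a).getD i [] = a := by
  simp [List.getD, h]

lemma getD_set_ne (l : List (List (Int × Int))) (i j : Nat) (a : List (Int × Int)) (h : i ≠ j) :
    (l.set i a).getD j [] = l.getD j [] := by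
  simp [List.getD, List.getElem?_set_ne h]

lemma set_getD_eq (l : List (List (Int × Int))) (k : Nat) :
    l.set k (l.getD k []) = l := by
  by_cases h : k < l.length
  · apply List.ext_getElem (by simp)
    intro j hj _
    rw [List.getElem_set]
    split
    · next heq => subst heq; simp [List.getD, List.getElem?_eq_getElem h]
    · rfl
  · exact List.set_eq_of_length_le (by omega)

-- a loop of append-at-index steps preserves the bucket count
lemma foldl_setAppend_length {β : Type} (gs : List β) (k : β → Nat) (items : β → List (Int × Int))
    (acc : List (List (Int × Int))) :
    (gs.foldl (fun a g => a.set (k g) (a.getD (k g) [] ++ items g)) acc).length = acc.length := by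
  induction gs generalizing acc with
  | nil => rfl
  | cons g gs ih => rw [List.foldl_cons, ih, List.length_set]

-- bucket characterisation: after the loop, bucket j holds its old content followed by the
-- payloads of exactly the steps that targeted j, in order
lemma foldl_setAppend_getD {β : Type} (gs : List β) (k : β → Nat) (items : β → List (Int × Int))
    (acc : List (List (Int × Int))) (j : Nat) (hj : j < acc.length) :
    (gs.foldl (fun a g => a.set (k g) (a.getD (k g) [] ++ items g)) acc).getD j []
      = acc.getD j [] ++ (gs.filter (fun g => k g == j)).flatMap items := by
  induction gs generalizing acc with
  | nil => simp
  | cons g gs ih =>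
    rw [List.foldl_cons, ih _ (by simpa using hj), List.filter_cons]
    by_cases hkg : k g = j
    · subst hkg
      rw [getD_set_self _ _ _ hj]
      simp [List.append_assoc]
    · rw [getD_set_ne _ _ _ _ hkg]
      simp [hkg]

-- a bucket loop that targets one fixed index appends all its payloads there at once
lemma foldl_appendAt_const (xs : List Int) (k : Nat) (f : Int → Int × Int)
    (acc : List (List (Int × Int))) :
    xs.foldl (fun a i => pvAppendAt a k (f i)) acc
      = acc.set k (acc.getD k [] ++ xs.map f) := by
  induction xs generalizing acc with
  | nil =>
    simp only [List.foldl_nil, List.map_nil, List.append_nil]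
    exact (set_getD_eq acc k).symm
  | cons x xs ih =>
    rw [List.foldl_cons, ih]
    by_cases hk : k < acc.length
    · rw [pvAppendAt, getD_set_self _ _ _ hk, List.set_set, List.map_cons,
          List.append_assoc, List.singleton_append]
    · have hle : acc.length ≤ k := by omega
      simp only [pvAppendAt, List.set_eq_of_length_le hle]

lemma filter_range_eq (M j : Nat) (h : j < M) :
    (List.range M).filter (fun k => k == j) = [j] := by
  induction M with
  | zero => omega
  | succ m ih =>
    rw [List.range_succ, List.filter_append]
    rcases Nat.lt_or_ge j m with h' | h'
    · simp [ih h', Nat.ne_of_gt h']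
    · have hj : j = m := by omega
      subst hj
      have : (List.range j).filter (fun k => k == j) = [] := by
        apply List.filter_eq_nil_iff.mpr
        intro k hk
        simp only [List.mem_range] at hk
        simp; omega
      simp [this]

-- the gpu indices 0..m-1, filtered down to those equal to j < m.toNat, are exactly [j]
lemma filter_pyRange_toNat (m : Int) (j : Nat) (hj : j < m.toNat) :
    (PySem.List.pyRange 0 m 1).filter (fun g => g.toNat == j) = [(j : Int)] := by
  rw [PySem.List.pyRange_one, List.filter_map]
  have : (fun g : Int => g.toNat == j) ∘ (fun k : Nat => (0 : Int) + k) = fun k : Nat => k == j := by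
    funext k; simp
  rw [this, filter_range_eq _ _ (by simpa using hj)]
  simp

theorem distribute_samples_spec : Claim_equal_distribute_samples := by
  intro samples num_gpus strategy _hdom hpre
  unfold Spec_distribute_samples distribute_samples distribute_samples_alt
  obtain ⟨hrr, hch⟩ := hpre
  by_cases hs1 : strategy = "round_robin"
  · -- round_robin branch
    simp only [hs1, String.reduceEq, ite_true]
    by_cases hnil : samples = []
    · subst hnil
      apply List.ext_getElem (by simp [PySem.List.enumerate, PySem.List.length_pyRange_one])
      intro j h1 h2
      simp [PySem.List.enumerate]
    · have hm : 0 < num_gpus := by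
        rcases Int.lt_or_le 0 num_gpus with h | h
        · exact h
        · exact absurd ⟨hs1, hnil, h⟩ hrr
      simp only [pvAppendAt]
      apply List.ext_getElem
      · rw [foldl_setAppend_length]
        simp [PySem.List.length_pyRange_one]
      · intro j h1 h2
        rw [foldl_setAppend_length] at h1
        have hjm : j < num_gpus.toNat := by simpa using h1
        rw [List.getElem_eq_getD (fallback := []),
            foldl_setAppend_getD _ _ _ _ j h1, List.getD_replicate _ hjm, List.nil_append,
            List.flatMap_singleton']
        rw [List.getElem_map, PySem.List.getElem_pyRange_one]
        apply List.filter_congr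
        intro p hp
        obtain ⟨k, hk, rfl⟩ := (PySem.List.mem_enumerate_iff _ _ _).mp hp
        have hmod0 : 0 ≤ PySem.Int.mod (0 + (k : Int)) num_gpus := PySem.Int.mod_nonneg _ hm
        have hmodlt : PySem.Int.mod (0 + (k : Int)) num_gpus < num_gpus := PySem.Int.mod_lt _ hm
        rw [Bool.eq_iff_iff]
        simp only [beq_iff_eq]
        omega
  · by_cases hs2 : strategy = "chunk"
    · -- chunk branch
      simp only [hs2, String.reduceEq, ite_true, ite_false]
      set n : Int := (samples.length : Int) with hn
      set c := PySem.Int.floordiv (n + num_gpus - 1) num_gpus with hc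
      -- rewrite the outer fold's step into set-append form
      have hstep : (fun (acc : List (List (Int × Int))) (g : Int) =>
            (PySem.List.pyRange (g * c) (min (g * c + c) n) 1).foldl
              (fun acc2 i => pvAppendAt acc2 g.toNat (i, PySem.List.pyGetD samples i 0)) acc)
          = fun acc g => acc.set g.toNat (acc.getD g.toNat [] ++
              (PySem.List.pyRange (g * c) (min (g * c + c) n) 1).map
                (fun i => (i, PySem.List.pyGetD samples i 0))) := by
        funext acc g
        exact foldl_appendAt_const _ _ _ _
      rw [hstep]
      apply List.ext_getElem
      · rw [foldl_setAppend_length]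
        simp [PySem.List.length_pyRange_one]
      · intro j h1 h2
        rw [foldl_setAppend_length] at h1
        have hjm : j < num_gpus.toNat := by simpa using h1
        rw [List.getElem_eq_getD (fallback := []),
            foldl_setAppend_getD _ _ _ _ j h1, List.getD_replicate _ hjm, List.nil_append,
            filter_pyRange_toNat num_gpus j hjm]
        rw [List.getElem_map, PySem.List.getElem_pyRange_one]
        have harith : ((j : Int) * c + c) = (((0 : Int) + j) + 1) * c := by ring
        simp [harith]
    · -- unknown strategy
      rw [if_neg hs1, if_neg hs2, if_neg hs1, if_neg hs2]
      apply List.ext_getElem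
      · simp [PySem.List.length_pyRange_one]
      · intro j h1 h2
        simp
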